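-- pv_equiv track=rewrite | github.com/OliverHiltz-Perron/Qdrant-Hybrid-Search-Implementation-Workflow | src/embed_cloud.py | find_section_hierarchy_for_position
-- ===== SOURCE A (Python) =====
-- from typing import Dict, List, Any
--
-- def find_section_hierarchy_for_position(position: int, headers: List[tuple]) -> Dict[int, str]:
--     """Find the complete section hierarchy for a given position"""
--     section_hierarchy = {}
--
--     for header_pos, header_level, header_text in headers:
--         if header_pos > position:
--             break
--
--         level = len(header_level)
--         section_hierarchy[level] = header_text
--
--         # Clear deeper levels when a higher level is encountered
--         keys_to_remove = [k for k in section_hierarchy.keys() if k > level]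
--         for key in keys_to_remove:
--             del section_hierarchy[key]
--
--     return section_hierarchy
-- ===== SOURCE B (Python) =====
-- from typing import Dict, List, Any
--
-- def find_section_hierarchy_for_position(position: int, headers: List[tuple]) -> Dict[int, str]:
--     """Find the complete section hierarchy for a given position.
--
--     One backward scan over the in-range prefix keeping a single threshold,
--     instead of per-header deletion of deeper keys."""
--     prefix = []
--     for header in headers:
--         if header[0] > position:
--             break
--         prefix.append(header)
--     kept = []
--     min_level = None
--     for _pos, header_level, header_text in reversed(prefix):
--         level = len(header_level)
--         if min_level is None or level < min_level:
--             kept.append((level, header_text))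
--             min_level = level
--     return dict(reversed(kept))
-- ===== Notes on version B (the rewrite author's own statement) =====
-- stated objective: alternative
-- what changed: Replaces A's forward scan that mutates a dict and deletes all deeper keys after every header by a single backward scan over the in-range prefix that keeps one min-level threshold and emits each level's nearest ancestor once.
import Mathlib
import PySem

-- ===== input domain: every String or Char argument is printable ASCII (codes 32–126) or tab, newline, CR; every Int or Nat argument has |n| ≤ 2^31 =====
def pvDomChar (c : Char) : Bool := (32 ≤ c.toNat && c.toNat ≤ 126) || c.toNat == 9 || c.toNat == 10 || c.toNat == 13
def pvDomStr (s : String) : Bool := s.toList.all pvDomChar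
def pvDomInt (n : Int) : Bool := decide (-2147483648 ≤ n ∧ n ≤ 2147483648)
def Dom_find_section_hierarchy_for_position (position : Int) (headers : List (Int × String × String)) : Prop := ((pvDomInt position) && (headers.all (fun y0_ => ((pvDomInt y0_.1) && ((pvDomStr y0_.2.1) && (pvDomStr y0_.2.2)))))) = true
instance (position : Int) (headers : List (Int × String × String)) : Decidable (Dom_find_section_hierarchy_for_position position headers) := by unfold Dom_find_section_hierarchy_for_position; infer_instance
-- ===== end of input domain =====

-- B replaces A's per-header deletion of deeper dict keys by one backward scan of the
-- in-range prefix keeping a single min-level threshold (objective: alternative algorithm).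

-- ===== PORT A =====
-- one iteration of A's loop body: insert at level, then delete all deeper keys
def pvAStep (d : PySem.Dict Int String) (h : Int × String × String) : PySem.Dict Int String :=
  let level : Int := PySem.Str.len h.2.1
  let d1 := d.insert level h.2.2
  let keysToRemove := d1.keys.filter (fun k => decide (level < k))
  keysToRemove.foldl (fun dd k => dd.erase k) d1

-- A's for-loop with its early `break`
def pvAGo (position : Int) (d : PySem.Dict Int String) : List (Int × String × String) → PySem.Dict Int String
  | [] => d
  | h :: rest => if h.1 > position then d else pvAGo position (pvAStep d h) rest

def find_section_hierarchy_for_position (position : Int) (headers : List (Int × String × String)) : List (Int × String) :=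
  (pvAGo position PySem.Dict.empty headers).items

-- ===== PORT B =====
-- B's first loop: collect the prefix of headers with header_pos ≤ position (stops at the first violator)
def pvPrefix (position : Int) : List (Int × String × String) → List (Int × String × String)
  | [] => []
  | h :: rest => if h.1 > position then [] else h :: pvPrefix position rest

-- B's second loop: scan (already reversed) headers keeping only strictly shallower levels
def pvBGo : List (Int × String × String) → Option Int → List (Int × String) → List (Int × String)
  | [], _, kept => kept
  | h :: rest, m, kept =>
      let level : Int := PySem.Str.len h.2.1
      if (match m with | none => true | some m0 => decide (level < m0)) then
        pvBGo rest (some level) (kept ++ [(level, h.2.2)])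
      else
        pvBGo rest m kept

def find_section_hierarchy_for_position_alt (position : Int) (headers : List (Int × String × String)) : List (Int × String) :=
  (PySem.Dict.ofList ((pvBGo (pvPrefix position headers).reverse none []).reverse)).items

-- ===== PRECONDITION & SPEC =====
def Spec_find_section_hierarchy_for_position (position : Int) (headers : List (Int × String × String)) (out : List (Int × String)) : Prop := out = find_section_hierarchy_for_position_alt position headers
instance (position : Int) (headers : List (Int × String × String)) (out : List (Int × String)) : Decidable (Spec_find_section_hierarchy_for_position position headers out) := by unfold Spec_find_section_hierarchy_for_position; infer_instance

-- ===== CLAIM (what is proved, stated in full; the proofs are below) =====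
def Claim_equal_find_section_hierarchy_for_position : Prop := ∀ (position : Int) (headers : List (Int × String × String)), Dom_find_section_hierarchy_for_position position headers → Spec_find_section_hierarchy_for_position position headers (find_section_hierarchy_for_position position headers)

-- ===== LEMMAS AND PROOFS =====

-- proof-side version of B's backward scan that builds its output front-to-back in ascending order
def pvBSpec : List (Int × String × String) → Option Int → List (Int × String)
  | [], _ => []
  | h :: rest, m =>
      let level : Int := PySem.Str.len h.2.1
      if (match m with | none => true | some m0 => decide (level < m0)) then
        pvBSpec rest (some level) ++ [(level, h.2.2)]
      else
        pvBSpec rest m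

theorem pvBSpec_cons_none (h : Int × String × String) (rest : List (Int × String × String)) :
    pvBSpec (h :: rest) none =
      pvBSpec rest (some (PySem.Str.len h.2.1)) ++ [(PySem.Str.len h.2.1, h.2.2)] := rfl

theorem pvBSpec_cons_keep (h : Int × String × String) (rest : List (Int × String × String))
    (m0 : Int) (hcmp : PySem.Str.len h.2.1 < m0) :
    pvBSpec (h :: rest) (some m0) =
      pvBSpec rest (some (PySem.Str.len h.2.1)) ++ [(PySem.Str.len h.2.1, h.2.2)] := by
  rw [PySem.Str.len_eq] at hcmp
  simp [pvBSpec]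
  intro hh
  exfalso
  simp only [String.length_toList] at *
  omega

theorem pvBSpec_cons_skip (h : Int × String × String) (rest : List (Int × String × String))
    (m0 : Int) (hcmp : ¬ PySem.Str.len h.2.1 < m0) :
    pvBSpec (h :: rest) (some m0) = pvBSpec rest (some m0) := by
  rw [PySem.Str.len_eq] at hcmp
  simp [pvBSpec]
  intro hh
  exfalso
  simp only [String.length_toList] at *
  omega

theorem pvBGo_eq (xs : List (Int × String × String)) (m : Option Int) (kept : List (Int × String)) :
    pvBGo xs m kept = kept ++ (pvBSpec xs m).reverse := by
  induction xs generalizing m kept with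
  | nil => simp [pvBGo, pvBSpec]
  | cons h rest ih =>
      cases m <;>
        · simp only [pvBGo, pvBSpec]
          split_ifs <;> rw [ih] <;> simp

-- A's loop-with-break equals a plain fold over the in-range prefix
theorem pvAGo_eq (position : Int) (d : PySem.Dict Int String) (xs : List (Int × String × String)) :
    pvAGo position d xs = (pvPrefix position xs).foldl pvAStep d := by
  induction xs generalizing d with
  | nil => rfl
  | cons h rest ih =>
      simp only [pvAGo, pvPrefix]
      split_ifs with hc
      · rfl
      · rw [ih]; rfl

-- folding `erase` over a key list is one filter
theorem pvFoldl_erase (K : List Int) (l : List (Int × String)) :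
    K.foldl (fun dd k => dd.erase k) (PySem.Dict.mk l) =
      PySem.Dict.mk (l.filter (fun p => !K.contains p.1)) := by
  induction K generalizing l with
  | nil =>
      simp only [List.foldl]
      congr 1
      symm
      rw [List.filter_eq_self]
      intro p _
      rfl
  | cons k K ih =>
      have he : (PySem.Dict.mk l).erase k = PySem.Dict.mk (l.filter (fun p => !(p.1 == k))) := rfl
      simp only [List.foldl, he, ih, List.filter_filter]
      congr 1
      apply List.filter_congr
      intro p _
      cases hpk : (p.1 == k) <;> cases hK : K.contains p.1 <;>
        simp_all [List.contains_cons]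

-- key-sortedness invariant of A's dict, and the characterisation of one loop step
def pvSorted (l : List (Int × String)) : Prop := l.Pairwise (fun p q => p.1 < q.1)

theorem pvMapReplace (L : Int) (txt : String) (l : List (Int × String)) (hs : pvSorted l)
    (hmem : L ∈ l.map Prod.fst) :
    (l.map (fun p => if p.1 == L then (L, txt) else p)).filter (fun p => decide (p.1 ≤ L)) =
      l.filter (fun p => decide (p.1 < L)) ++ [(L, txt)] := by
  induction l with
  | nil => simp at hmem
  | cons p rest ih =>
      obtain ⟨hp, hrest⟩ := List.pairwise_cons.1 hs
      by_cases hpL : p.1 = L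
      · have hall : ∀ q ∈ rest, L < q.1 := fun q hq => hpL ▸ hp q hq
        have h1 : (rest.map (fun p => if p.1 == L then (L, txt) else p)).filter
            (fun p => decide (p.1 ≤ L)) = [] := by
          rw [List.filter_eq_nil_iff]
          intro q hq
          obtain ⟨q0, hq0, rfl⟩ := List.mem_map.1 hq
          have := hall q0 hq0
          have hne : (q0.1 == L) = false := by simp; omega
          simp [hne]; omega
        have h2 : rest.filter (fun p => decide (p.1 < L)) = [] := by
          rw [List.filter_eq_nil_iff]
          intro q hq
          have := hall q hq
          simp; omega
        have hbeq : (p.1 == L) = true := by simp [hpL]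
        have hDrop : decide (p.1 < L) = false := by simp [hpL]
        rw [List.map_cons, List.filter_cons, List.filter_cons]
        simp only [hbeq, if_true, hDrop, Bool.false_eq_true, if_false, h1, h2]
        simp
      · have hne : (p.1 == L) = false := by simp [hpL]
        have hmem' : L ∈ rest.map Prod.fst := by
          rcases List.mem_map.1 hmem with ⟨q, hq, rfl⟩
          rcases List.mem_cons.1 hq with rfl | hq'
          · exact absurd rfl hpL
          · exact List.mem_map.2 ⟨q, hq', rfl⟩
        have hplt : p.1 < L := by
          rcases List.mem_map.1 hmem' with ⟨q, hq, rfl⟩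
          exact hp q hq
        have hle : decide (p.1 ≤ L) = true := by simp; omega
        have hlt : decide (p.1 < L) = true := by simp; omega
        rw [List.map_cons, List.filter_cons, List.filter_cons]
        simp only [hne, Bool.false_eq_true, if_false, hle, hlt, if_true]
        rw [ih hrest hmem']
        simp

theorem pvAStep_items (d : PySem.Dict Int String) (h : Int × String × String)
    (hs : pvSorted d.items) :
    (pvAStep d h).items =
      d.items.filter (fun p => decide (p.1 < PySem.Str.len h.2.1)) ++ [(PySem.Str.len h.2.1, h.2.2)] := by
  obtain ⟨l⟩ := d
  have e1 : pvAStep (PySem.Dict.mk l) h =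
      (((PySem.Dict.mk l).insert (PySem.Str.len h.2.1) h.2.2).keys.filter
        (fun k => decide (PySem.Str.len h.2.1 < k))).foldl (fun dd k => dd.erase k)
        ((PySem.Dict.mk l).insert (PySem.Str.len h.2.1) h.2.2) := rfl
  have e2 := pvFoldl_erase
    (((PySem.Dict.mk l).insert (PySem.Str.len h.2.1) h.2.2).keys.filter
      (fun k => decide (PySem.Str.len h.2.1 < k)))
    (((PySem.Dict.mk l).insert (PySem.Str.len h.2.1) h.2.2).items)
  rw [e1, e2]
  show (((PySem.Dict.mk l).insert (PySem.Str.len h.2.1) h.2.2).items.filter _) = _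
  have hK : ∀ p ∈ ((PySem.Dict.mk l).insert (PySem.Str.len h.2.1) h.2.2).items,
      (!(((PySem.Dict.mk l).insert (PySem.Str.len h.2.1) h.2.2).keys.filter
        (fun k => decide (PySem.Str.len h.2.1 < k))).contains p.1) = decide (p.1 ≤ PySem.Str.len h.2.1) := by
    intro p hp
    have hmemk : p.1 ∈ ((PySem.Dict.mk l).insert (PySem.Str.len h.2.1) h.2.2).keys :=
      PySem.Dict.mem_keys_of_mem_items _ hp
    by_cases hgt : PySem.Str.len h.2.1 < p.1
    · have hin : p.1 ∈ (((PySem.Dict.mk l).insert (PySem.Str.len h.2.1) h.2.2).keys.filter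
          (fun k => decide (PySem.Str.len h.2.1 < k))) := List.mem_filter.2 ⟨hmemk, by simpa⟩
      simp only [PySem.Str.len_eq, String.length_toList] at hin hgt ⊢
      simp [hin]
      omega
    · have hout : p.1 ∉ (((PySem.Dict.mk l).insert (PySem.Str.len h.2.1) h.2.2).keys.filter
          (fun k => decide (PySem.Str.len h.2.1 < k))) := by
        intro hmem
        exact hgt (by simpa using (List.mem_filter.1 hmem).2)
      simp only [PySem.Str.len_eq, String.length_toList] at hout hgt ⊢
      simp [hout]
      omega
  rw [List.filter_congr hK]
  by_cases hc : (PySem.Dict.mk l).contains (PySem.Str.len h.2.1)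
  · rw [PySem.Dict.items_insert_of_contains _ _ hc]
    have hmem : PySem.Str.len h.2.1 ∈ l.map Prod.fst := by
      have := (PySem.Dict.contains_iff_mem_keys _ _).1 hc
      simpa using this
    exact pvMapReplace (PySem.Str.len h.2.1) h.2.2 l hs hmem
  · rw [PySem.Dict.items_insert_of_not_contains _ _ (Bool.eq_false_iff.2 hc)]
    rw [List.filter_append]
    have h2 : ([((PySem.Str.len h.2.1 : Int), h.2.2)].filter
        (fun p => decide (p.1 ≤ PySem.Str.len h.2.1))) = [(PySem.Str.len h.2.1, h.2.2)] := by simp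
    have hnot : (PySem.Str.len h.2.1) ∉ l.map Prod.fst := by
      intro hmem
      exact hc ((PySem.Dict.contains_iff_mem_keys _ _).2 (by simpa using hmem))
    have h1 : l.filter (fun p => decide (p.1 ≤ PySem.Str.len h.2.1)) =
        l.filter (fun p => decide (p.1 < PySem.Str.len h.2.1)) := by
      apply List.filter_congr
      intro p hp
      have hne : p.1 ≠ PySem.Str.len h.2.1 := by
        intro he
        exact hnot (he ▸ List.mem_map.2 ⟨p, hp, rfl⟩)
      rw [PySem.Str.len_eq] at hne
      simp
      simp only [String.length_toList] at *
      omega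
    rw [h1, h2]

theorem pvAStep_sorted (d : PySem.Dict Int String) (h : Int × String × String)
    (hs : pvSorted d.items) : pvSorted (pvAStep d h).items := by
  rw [pvAStep_items d h hs]
  apply List.pairwise_append.2
  refine ⟨hs.filter _, List.pairwise_singleton _ _, ?_⟩
  intro a ha b hb
  rcases List.mem_singleton.1 hb with rfl
  have := List.of_mem_filter ha
  simpa using this

theorem pvFoldl_sorted (xs : List (Int × String × String)) (d : PySem.Dict Int String)
    (hs : pvSorted d.items) : pvSorted (xs.foldl pvAStep d).items := by
  induction xs generalizing d with
  | nil => exact hs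
  | cons x xs ih => exact ih _ (pvAStep_sorted d x hs)

def pvKeep (m : Option Int) (l : List (Int × String)) : List (Int × String) :=
  match m with
  | none => l
  | some m0 => l.filter (fun p => decide (p.1 < m0))

theorem pvCore (ys : List (Int × String × String)) (m : Option Int) :
    pvKeep m (ys.foldl pvAStep PySem.Dict.empty).items = pvBSpec ys.reverse m := by
  induction ys using List.reverseRecOn generalizing m with
  | nil => cases m <;> simp [pvKeep, pvBSpec, PySem.Dict.empty]
  | append_singleton zs x ih =>
      have hsorted : pvSorted ((zs.foldl pvAStep PySem.Dict.empty).items) :=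
        pvFoldl_sorted zs _ (by simp [pvSorted, PySem.Dict.empty])
      rw [List.foldl_append]
      simp only [List.foldl]
      rw [pvAStep_items _ x hsorted, List.reverse_append]
      simp only [List.reverse_cons, List.reverse_nil, List.nil_append, List.singleton_append]
      cases m with
      | none =>
          rw [pvBSpec_cons_none, ← ih (some (PySem.Str.len x.2.1))]
          rfl
      | some m0 =>
          by_cases hcmp : PySem.Str.len x.2.1 < m0
          · rw [pvBSpec_cons_keep _ _ _ hcmp, ← ih (some (PySem.Str.len x.2.1))]
            show (((zs.foldl pvAStep PySem.Dict.empty).items.filter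
                (fun p => decide (p.1 < PySem.Str.len x.2.1)) ++
                [(PySem.Str.len x.2.1, x.2.2)]).filter (fun p => decide (p.1 < m0))) = _
            rw [List.filter_append, List.filter_filter]
            have h1 : ((zs.foldl pvAStep PySem.Dict.empty).items.filter
                (fun p => decide (p.1 < m0) && decide (p.1 < PySem.Str.len x.2.1))) =
                ((zs.foldl pvAStep PySem.Dict.empty).items.filter
                (fun p => decide (p.1 < PySem.Str.len x.2.1))) := by
              apply List.filter_congr
              intro p _
              rw [PySem.Str.len_eq] at hcmp
              by_cases hpl : p.1 < PySem.Str.len x.2.1 <;>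
                rw [PySem.Str.len_eq] at hpl <;> simp [hpl] <;> simp only [String.length_toList] at * <;> omega
            have h2 : ([((PySem.Str.len x.2.1 : Int), x.2.2)].filter
                (fun p => decide (p.1 < m0))) = [(PySem.Str.len x.2.1, x.2.2)] := by
              have hcmp' := hcmp
              rw [PySem.Str.len_eq] at hcmp'
              simp
              simp only [String.length_toList] at *
              omega
            rw [h1, h2]
            rfl
          · rw [pvBSpec_cons_skip _ _ _ hcmp, ← ih (some m0)]
            show (((zs.foldl pvAStep PySem.Dict.empty).items.filter
                (fun p => decide (p.1 < PySem.Str.len x.2.1)) ++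
                [(PySem.Str.len x.2.1, x.2.2)]).filter (fun p => decide (p.1 < m0))) = _
            rw [List.filter_append, List.filter_filter]
            have h1 : ((zs.foldl pvAStep PySem.Dict.empty).items.filter
                (fun p => decide (p.1 < m0) && decide (p.1 < PySem.Str.len x.2.1))) =
                ((zs.foldl pvAStep PySem.Dict.empty).items.filter
                (fun p => decide (p.1 < m0))) := by
              apply List.filter_congr
              intro p _
              rw [PySem.Str.len_eq] at hcmp
              by_cases hpm : p.1 < m0 <;> simp [hpm] <;>
                simp only [String.length_toList] at * <;> omega
            have h2 : ([((PySem.Str.len x.2.1 : Int), x.2.2)].filter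
                (fun p => decide (p.1 < m0))) = [] := by
              have hcmp' := hcmp
              rw [PySem.Str.len_eq] at hcmp'
              simp
              simp only [String.length_toList] at *
              omega
            rw [h1, h2, List.append_nil]
            rfl

-- every key of pvBSpec xs (some m0) is < m0; pvBSpec is key-sorted ascending
theorem pvBSpec_lt (xs : List (Int × String × String)) (m0 : Int) :
    ∀ p ∈ pvBSpec xs (some m0), p.1 < m0 := by
  induction xs generalizing m0 with
  | nil => intro p hp; simp [pvBSpec] at hp
  | cons h rest ih =>
      intro p hp
      by_cases hL : PySem.Str.len h.2.1 < m0
      · simp only [pvBSpec, hL, decide_true, if_true] at hp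
        rcases List.mem_append.1 hp with hp' | hp'
        · exact lt_trans (ih _ p hp') hL
        · rcases List.mem_singleton.1 hp' with rfl; exact hL
      · simp only [pvBSpec, hL, decide_false, if_false] at hp
        exact ih _ p hp

theorem pvBSpec_sorted (xs : List (Int × String × String)) (m : Option Int) :
    pvSorted (pvBSpec xs m) := by
  induction xs generalizing m with
  | nil => simp [pvBSpec, pvSorted]
  | cons h rest ih =>
      cases m with
      | none =>
          simp only [pvBSpec]
          apply List.pairwise_append.2
          refine ⟨ih _, List.pairwise_singleton _ _, ?_⟩
          intro a ha b hb
          rcases List.mem_singleton.1 hb with rfl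
          exact pvBSpec_lt rest _ a ha
      | some m0 =>
          by_cases hL : PySem.Str.len h.2.1 < m0
          · simp only [pvBSpec, hL, decide_true, if_true]
            apply List.pairwise_append.2
            refine ⟨ih _, List.pairwise_singleton _ _, ?_⟩
            intro a ha b hb
            rcases List.mem_singleton.1 hb with rfl
            exact pvBSpec_lt rest _ a ha
          · simp only [pvBSpec, hL, decide_false, if_false]
            exact ih _

theorem pvOfList_items (l : List (Int × String)) (hnd : (l.map Prod.fst).Nodup) :
    (PySem.Dict.ofList l).items = l := by
  have h0 : PySem.Dict.ofList l =
      l.foldl (fun d p => d.insert p.1 p.2) PySem.Dict.empty := rfl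
  have h1 := PySem.Dict.items_foldl_insert_fresh (l := l) (k := Prod.fst) (v := Prod.snd)
    (d := PySem.Dict.empty) (by simp) hnd
  rw [h0]
  simpa using h1

-- ===== VERDICT (by name: the statement is the Claim_ definition above) =====
theorem find_section_hierarchy_for_position_spec : Claim_equal_find_section_hierarchy_for_position := by
  intro position headers _
  unfold Spec_find_section_hierarchy_for_position
  unfold find_section_hierarchy_for_position find_section_hierarchy_for_position_alt
  rw [pvAGo_eq, pvBGo_eq]
  simp only [List.nil_append]
  rw [List.reverse_reverse]
  have hsor := pvBSpec_sorted (pvPrefix position headers).reverse none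
  have hnd : ((pvBSpec (pvPrefix position headers).reverse none).map Prod.fst).Nodup :=
    List.pairwise_map.2 (hsor.imp (fun hab => ne_of_lt hab))
  rw [pvOfList_items _ hnd]
  have := pvCore (pvPrefix position headers) none
  simpa [pvKeep] using this
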